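-- pv_equiv track=rewrite | github.com/tianyiniu/LING427_project | convert_data.py | find_suffix
-- ===== SOURCE A (Python) =====
-- def find_suffix(singular, plural):
--     last_char = singular[-1]
--     suffix = []
--     for i in range(len(plural)-1, 0, -1):
--         if plural[i] == last_char:
--             break
--         else:
--             suffix.append(plural[i])
--     return "".join(suffix[::-1])
-- ===== SOURCE B (Python) =====
-- def find_suffix(singular, plural):
--     last_char = singular[-1]
--     rev = plural[1:][::-1]
--     i = rev.find(last_char)
--     return rev[::-1] if i == -1 else rev[:i][::-1]
-- ===== Notes on version B (the rewrite author's own statement) =====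
-- stated objective: idiomatic
-- what changed: A's reverse index loop with break, list accumulation and final reversal is replaced by an idiomatic slice pipeline: reverse the tail plural[1:][::-1], locate last_char with str.find, and slice-and-reverse the part before it.
import Mathlib
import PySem

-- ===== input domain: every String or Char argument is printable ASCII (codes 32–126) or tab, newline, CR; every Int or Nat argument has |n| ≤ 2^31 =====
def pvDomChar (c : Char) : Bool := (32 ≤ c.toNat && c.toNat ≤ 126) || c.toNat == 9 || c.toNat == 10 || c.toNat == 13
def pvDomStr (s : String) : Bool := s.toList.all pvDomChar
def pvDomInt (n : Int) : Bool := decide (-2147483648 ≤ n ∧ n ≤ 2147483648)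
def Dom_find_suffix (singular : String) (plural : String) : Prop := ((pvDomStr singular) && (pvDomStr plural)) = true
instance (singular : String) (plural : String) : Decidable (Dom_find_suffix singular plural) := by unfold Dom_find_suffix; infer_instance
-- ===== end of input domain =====

-- B replaces A's explicit reverse index loop with break by a reverse-slice + find + slice
-- pipeline (idiomatic, same result); equivalence is proved for every nonempty singular.

-- ===== PORT A =====
-- the loop 'for i in range(len(plural)-1, 0, -1): if plural[i]==last_char: break else: suffix.append(plural[i])'
def fsLoopA (plural : List Char) (c : Char) : List Int → List Char
  | [] => []
  | i :: rest =>
    match PySem.List.pyGet? plural i with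
    | none => []   -- unreachable: every generated index is in range
    | some x => if x = c then [] else x :: fsLoopA plural c rest

def find_suffix (singular : String) (plural : String) : String :=
  match PySem.Str.pyGet? singular (-1) with
  | none => ""   -- IndexError on empty singular: excluded by Pre_
  | some lastChar =>
    String.ofList ((PySem.List.slice?
      (fsLoopA plural.toList lastChar (PySem.List.pyRange (PySem.Str.len plural - 1) 0 (-1)))
      none none (-1)).getD [])   -- "".join(suffix[::-1])

-- ===== PORT B =====
def find_suffix_alt (singular : String) (plural : String) : String :=
  match PySem.Str.pyGet? singular (-1) with
  | none => ""   -- IndexError on empty singular: excluded by Pre_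
  | some lastChar =>
    let rev := (PySem.Str.slice? (PySem.Str.slice plural (some 1) none) none none (-1)).getD ""  -- plural[1:][::-1]
    let i := PySem.Str.find rev (String.ofList [lastChar])                                       -- rev.find(last_char)
    if i = -1 then (PySem.Str.slice? rev none none (-1)).getD ""                                 -- rev[::-1]
    else (PySem.Str.slice? (PySem.Str.slice rev none (some i)) none none (-1)).getD ""           -- rev[:i][::-1]

-- ===== PRECONDITION & SPEC =====
-- Pre_ excludes only empty singular, on which A raises IndexError at singular[-1].
def Pre_find_suffix (singular : String) (plural : String) : Prop := singular ≠ ""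
instance (singular : String) (plural : String) : Decidable (Pre_find_suffix singular plural) := by unfold Pre_find_suffix; infer_instance
def pvWitness_find_suffix : String × String := ("cat", "cats")

def Spec_find_suffix (singular : String) (plural : String) (out : String) : Prop := out = find_suffix_alt singular plural
instance (singular : String) (plural : String) (out : String) : Decidable (Spec_find_suffix singular plural out) := by unfold Spec_find_suffix; infer_instance

-- ===== CLAIM (what is proved, stated in full; the proofs are below) =====
def Claim_equal_find_suffix : Prop := ∀ (singular : String) (plural : String), Dom_find_suffix singular plural → Pre_find_suffix singular plural → Spec_find_suffix singular plural (find_suffix singular plural)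

-- ===== LEMMAS AND PROOFS =====

lemma pyGet_neg_one_of_ne_nil (xs : List Char) (h : xs ≠ []) :
    PySem.List.pyGet? xs (-1) = some (xs.getLast h) := by
  unfold PySem.List.pyGet? PySem.List.pyIdx?
  have hlen : 0 < xs.length := List.length_pos_iff.mpr h
  rw [if_neg (by omega), if_pos (by omega : -(xs.length:Int) ≤ -1)]
  simp only [Option.bind_some, neg_neg, Int.toNat_one]
  rw [List.getElem?_eq_getElem (by omega)]
  congr 1
  exact (List.getLast_eq_getElem h).symm

lemma strGet_neg_one_exists (s : String) (h : s ≠ "") :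
    ∃ c, PySem.Str.pyGet? s (-1) = some c := by
  have hne : s.toList ≠ [] := by
    intro hnil
    exact h (by simpa using congrArg String.ofList hnil)
  exact ⟨_, by
    simp only [PySem.Str.pyGet?_eq, PySem.Chars.pyGet?_eq_listPyGet?]
    exact pyGet_neg_one_of_ne_nil _ hne⟩

-- [c] is a prefix of l.drop k  ↔  l[k]? = some c
lemma singleton_prefix_drop (l : List Char) (c : Char) (k : Nat) :
    [c] <+: l.drop k ↔ l[k]? = some c := by
  constructor
  · rintro ⟨t, ht⟩
    have : (l.drop k)[0]? = some c := by rw [← ht]; simp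
    simpa [List.getElem?_drop] using this
  · intro h
    have hk : k < l.length := by
      by_contra hk
      rw [List.getElem?_eq_none (by omega)] at h
      simp at h
    refine ⟨(l.drop k).tail, ?_⟩
    have hd : l.drop k = l[k] :: l.drop (k + 1) := List.drop_eq_getElem_cons hk
    have hc : l[k] = c := by simpa [List.getElem?_eq_getElem hk] using h
    simp [hd, hc]

lemma takeWhile_eq_take {α : Type} (p : α → Bool) (r : List α) (k : Nat) (x : α)
    (hk : r[k]? = some x) (hx : p x = false)
    (hj : ∀ j (y : α), j < k → r[j]? = some y → p y = true) :
    r.takeWhile p = r.take k := by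
  induction r generalizing k with
  | nil => simp at hk
  | cons a t ih =>
    cases k with
    | zero =>
      simp only [List.getElem?_cons_zero, Option.some.injEq] at hk
      subst hk
      simp [hx]
    | succ k =>
      have ha : p a = true := hj 0 a (Nat.succ_pos _) rfl
      simp only [List.getElem?_cons_succ] at hk
      have ht := ih k hk (fun j y hjk hjy => hj (j + 1) y (by omega) (by simpa using hjy))
      simp [ha, ht]

lemma mem_iff_singleton_infix (r : List Char) (c : Char) : [c] <:+: r ↔ c ∈ r := by
  constructor
  · intro h
    exact h.subset (by simp)
  · intro h
    obtain ⟨s, t, hst⟩ := List.append_of_mem h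
    exact ⟨s, t, by simp [hst]⟩

-- A's loop over range(len-1, 0, -1) collects the reversed tail up to the first hit of c
lemma fsLoopA_eq (a : Char) (t : List Char) (c : Char) (n : Nat) (hn : n ≤ t.length) :
    fsLoopA (a :: t) c (PySem.List.pyRange (n : Int) 0 (-1))
      = ((t.take n).reverse).takeWhile (fun x => x ≠ c) := by
  induction n with
  | zero => simp [PySem.List.pyRange_neg_one_eq_nil (by omega : (0:Int) ≤ 0), fsLoopA]
  | succ n ih =>
    rw [PySem.List.pyRange_neg_one_cons (by exact_mod_cast Nat.succ_pos n)]
    have hn' : n ≤ t.length := by omega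
    have hnt : n < t.length := by omega
    have hget : PySem.List.pyGet? (a :: t) ((n + 1 : Nat) : Int) = some t[n] := by
      rw [PySem.List.pyGet?_natCast]
      simp [List.getElem?_eq_getElem (by simpa using by omega : n + 1 < (a :: t).length)]
    have hcast : ((n + 1 : Nat) : Int) - 1 = ((n : Nat) : Int) := by push_cast; ring
    have htake : t.take (n + 1) = t.take n ++ [t[n]] := by
      rw [List.take_add_one, List.getElem?_eq_getElem hnt]
      simp
    rw [fsLoopA, hget, hcast, ih hn', htake]
    simp only [List.reverse_append, List.reverse_singleton, List.singleton_append,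
      List.takeWhile_cons]
    by_cases hc : t[n] = c <;> simp [hc]

lemma find_suffix_eq_alt (singular plural : String) (h : singular ≠ "") :
    find_suffix singular plural = find_suffix_alt singular plural := by
  obtain ⟨c, hc⟩ := strGet_neg_one_exists singular h
  simp only [find_suffix, find_suffix_alt, hc, PySem.Str.slice?_none_none_neg_one,
    PySem.List.slice?_none_none_neg_one, Option.getD_some, PySem.Str.toList_slice,
    PySem.Chars.slice_eq_listSlice, PySem.List.slice_from_one, String.toList_ofList,
    PySem.Str.find_eq]
  -- turn Str.len into toList.length, then forget the string
  have hlen : PySem.Str.len plural = ((plural.toList.length : Nat) : Int) := by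
    simp [PySem.Str.len_eq]
  rw [hlen]
  generalize plural.toList = l
  have hloop : fsLoopA l c (PySem.List.pyRange ((l.length : Int) - 1) 0 (-1))
      = (l.tail.reverse).takeWhile (fun x => x ≠ c) := by
    cases l with
    | nil =>
      rw [show ((([] : List Char).length : Int) - 1) = -1 by simp,
        PySem.List.pyRange_neg_one_eq_nil (by omega)]
      simp [fsLoopA]
    | cons a t =>
      rw [show (((a :: t).length : Int) - 1) = ((t.length : Nat) : Int) by simp,
        fsLoopA_eq a t c t.length le_rfl]
      simp
  rw [hloop]
  by_cases hi : PySem.Chars.find l.tail.reverse [c] = -1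
  · rw [if_pos hi]
    have hnm : c ∉ l.tail.reverse := fun hm =>
      ((PySem.Chars.find_eq_neg_one_iff _ [c]).mp hi) ((mem_iff_singleton_infix _ c).mpr hm)
    rw [List.takeWhile_eq_self_iff.mpr (fun x hx => by
      simp only [decide_eq_true_eq]
      exact fun hxc => hnm (hxc ▸ hx))]
  · rw [if_neg hi]
    have hpos : 0 ≤ PySem.Chars.find l.tail.reverse [c] := by
      have := PySem.Chars.neg_one_le_find l.tail.reverse [c]
      omega
    obtain ⟨hpre, hmin⟩ := PySem.Chars.find_spec hpos
    have hk' : l.tail.reverse[(PySem.Chars.find l.tail.reverse [c]).toNat]? = some c :=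
      (singleton_prefix_drop _ c _).mp hpre
    rw [takeWhile_eq_take _ _ _ c hk' (by simp)
      (fun j y hjk hjy => by
        simp only [decide_eq_true_eq]
        intro hyc
        exact hmin j hjk ((singleton_prefix_drop _ c j).mpr (hyc ▸ hjy)))]
    congr 1
    rw [PySem.List.slice_to _ hpos]

-- ===== VERDICT (by name: the statement is the Claim_ definition above) =====
theorem find_suffix_spec : Claim_equal_find_suffix := by
  intro singular plural _ hpre
  unfold Spec_find_suffix
  exact find_suffix_eq_alt singular plural hpre
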